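-- pv_equiv track=rewrite | github.com/LiamP921/Project-Euler | Euler 1-50/Euler 41-50/Euler 50 - Consecutive Prime Sum.py | largestConsPrimeSequence
-- ===== SOURCE A (Python) =====
-- def sieve(limit):
--     primes = [2, 3]
--     is_prime = [True] * (limit - 1)
--     """ iterate over every sixth odd from 5 and check primality. If it's prime, append to and mark all multiples
--     (excluding evens) as composite in 'is_prime'. Repeat for every sixth number that is two more than a multiple of six.  """
--     for i in range(5, limit, 6):
--         if is_prime[(i - 2) // 2]:
--             primes.append(i)
--             for j in range(i * i, limit, 2 * i):
--                 is_prime[(j - 2) // 2] = False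
--         if i + 2 < limit and is_prime[(i + 2 - 2) // 2]:
--             primes.append(i + 2)
--             for j in range((i + 2) * (i + 2), limit, 2 * (i + 2)):
--                 is_prime[(j - 2) // 2] = False
--     return primes
--
-- def largestConsPrimeSequence(limit):
--     prime_list = sieve(limit)
--     prime_set = set(prime_list)
--     longest_sum = 0
--     longest_length = 0
--     current_sum = 0
--     i = 0
--     j = 0
--     """ inner loop repeatedly adds primes to 'current_sum' until the sum exceeds the limit, or until all primes have been added.
--     At each iteration, 'j' is incremented to add the next prime, and the length of the current sequence of primes ('length')
--     is computed as the difference between 'j and i'. """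
--     while j < len(prime_list):
--         while j < len(prime_list) and current_sum + prime_list[j] <= limit:
--             current_sum += prime_list[j]
--             j += 1
--         length = j - i
--         """ if the length of the current sequence > 'longest_length', and the sum of the sequence ('current_sum') is prime
--         (checked via 'prime_set'), 'longest_sum' and 'longest_length' are updated. """
--         if length > longest_length and current_sum in prime_set:
--             longest_sum = current_sum
--             longest_length = length
--         current_sum -= prime_list[i]
--         i += 1
--     return longest_sum
-- ===== SOURCE B (Python) =====
-- def sieve(limit):
--     primes = [2, 3]
--     is_prime = [True] * (limit - 1)
--     for i in range(5, limit, 6):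
--         if is_prime[(i - 2) // 2]:
--             primes.append(i)
--             for j in range(i * i, limit, 2 * i):
--                 is_prime[(j - 2) // 2] = False
--         if i + 2 < limit and is_prime[(i + 2 - 2) // 2]:
--             primes.append(i + 2)
--             for j in range((i + 2) * (i + 2), limit, 2 * (i + 2)):
--                 is_prime[(j - 2) // 2] = False
--     return primes
--
-- def _maxLE(xs, target):
--     # binary search: largest idx in [0, len(xs)-1] with xs[idx] <= target (0 if none)
--     lo, hi = 0, len(xs) - 1
--     while lo < hi:
--         mid = (lo + hi + 1) // 2
--         if xs[mid] <= target:
--             lo = mid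
--         else:
--             hi = mid - 1
--     return lo
--
-- def largestConsPrimeSequence(limit):
--     prime_list = sieve(limit)
--     n = len(prime_list)
--     # prefix[k] = sum of the first k primes (strictly increasing)
--     prefix = [0]
--     acc = 0
--     for p in prime_list:
--         acc = acc + p
--         prefix.append(acc)
--     longest_sum = 0
--     longest_length = 0
--     for i in range(n + 1):
--         # maximal window [i, j) whose sum stays <= limit, by binary search
--         j = _maxLE(prefix, prefix[i] + limit)
--         window_sum = prefix[j] - prefix[i]
--         # primality of window_sum by binary search in the sorted prime list
--         if j - i > longest_length and prime_list[_maxLE(prime_list, window_sum)] == window_sum: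
--             longest_sum = window_sum
--             longest_length = j - i
--         if j == n:
--             break
--     return longest_sum
-- ===== Notes on version B (the rewrite author's own statement) =====
-- stated objective: alternative
-- what changed: The two-pointer sliding-window scan is replaced by a prefix-sum list with a hand-written binary search that finds each start's maximal window end directly, and the set membership test is replaced by a binary search in the sorted prime list (breaking, like A, once the window reaches the last prime); sieve() is kept unchanged.
import Mathlib
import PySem

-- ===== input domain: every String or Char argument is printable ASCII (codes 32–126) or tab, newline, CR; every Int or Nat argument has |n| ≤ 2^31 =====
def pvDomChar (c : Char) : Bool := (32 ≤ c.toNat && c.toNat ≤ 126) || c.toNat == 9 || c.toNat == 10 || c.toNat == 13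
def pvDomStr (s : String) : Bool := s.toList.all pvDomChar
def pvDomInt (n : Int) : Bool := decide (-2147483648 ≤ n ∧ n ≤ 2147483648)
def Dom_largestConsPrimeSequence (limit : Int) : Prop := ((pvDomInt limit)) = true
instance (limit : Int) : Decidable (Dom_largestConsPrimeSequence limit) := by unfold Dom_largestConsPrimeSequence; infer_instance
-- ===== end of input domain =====

-- B replaces A's two-pointer sliding-window search with prefix sums plus a hand-written
-- binary search for each window's maximal end (objective: alternative algorithm, not faster);
-- sieve() is kept unchanged in both.

-- ===== PORT A =====

-- is_prime[(j-2)//2] = False for j in range(i*i, limit, 2*i)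
def pvMark (limit i : Int) (ip : List Bool) : List Bool :=
  (PySem.List.pyRange (i * i) limit (2 * i)).foldl
    (fun ip j => PySem.List.pySetD ip (PySem.Int.floordiv (j - 2) 2) false) ip

-- one iteration of sieve's outer loop (indices stay in range on every reachable i, so pyGetD is exact)
def pvSieveStep (limit : Int) (st : List Int × List Bool) (i : Int) : List Int × List Bool :=
  let st1 :=
    if PySem.List.pyGetD st.2 (PySem.Int.floordiv (i - 2) 2) false then
      (st.1 ++ [i], pvMark limit i st.2)
    else st
  if i + 2 < limit ∧ PySem.List.pyGetD st1.2 (PySem.Int.floordiv (i + 2 - 2) 2) false then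
    (st1.1 ++ [i + 2], pvMark limit (i + 2) st1.2)
  else st1

def sieve (limit : Int) : List Int :=
  ((PySem.List.pyRange 5 limit 6).foldl (pvSieveStep limit)
    ([2, 3], List.replicate (limit - 1).toNat true)).1

-- inner while loop of A: add primes while the sum stays ≤ limit (fuel ≥ remaining steps,
-- so the 0-fuel branch is never reached at the call below)
def pvInnerA (L : List Int) (limit : Int) : Nat → Int → Nat → Int × Nat
  | 0, cs, j => (cs, j)
  | fuel + 1, cs, j =>
    if j < L.length ∧ cs + L.getD j 0 ≤ limit then
      pvInnerA L limit fuel (cs + L.getD j 0) (j + 1)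
    else (cs, j)

-- outer while loop of A (fuel-based; A raises IndexError at prime_list[i] when limit < 3,
-- outside Pre_, where the port returns its accumulator instead)
def pvOuterA (L : List Int) (s : PySem.Set Int) (limit : Int) :
    Nat → Int → Int → Int → Nat → Nat → Int
  | 0, ls, _, _, _, _ => ls
  | fuel + 1, ls, ll, cs, i, j =>
    if j < L.length then
      let p := pvInnerA L limit (L.length + 1) cs j
      let len : Int := (p.2 : Int) - (i : Int)
      let lsll := if len > ll ∧ PySem.Set.contains s p.1 then (p.1, len) else (ls, ll)
      pvOuterA L s limit fuel lsll.1 lsll.2 (p.1 - PySem.List.pyGetD L (i : Int) 0) (i + 1) p.2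
    else ls

def largestConsPrimeSequence (limit : Int) : Int :=
  let L := sieve limit
  let s := PySem.Set.ofList L
  pvOuterA L s limit (L.length + 2) 0 0 0 0 0

-- ===== PORT B =====

-- B-side sieve: the same sieve() code, with is_prime held as a Lean Array Bool (a Python
-- list of booleans IS an array with O(1) get/set; every index reached below is nonnegative,
-- where .toNat is exact, so get/set here are exact ports of the Python accesses)
def pvMarkB (limit i : Int) (ip : Array Bool) : Array Bool :=
  (PySem.List.pyRange (i * i) limit (2 * i)).foldl
    (fun ip j => ip.setIfInBounds (PySem.Int.floordiv (j - 2) 2).toNat false) ip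

def pvSieveStepB (limit : Int) (st : List Int × Array Bool) (i : Int) : List Int × Array Bool :=
  let st1 :=
    if st.2.getD (PySem.Int.floordiv (i - 2) 2).toNat false then
      (st.1 ++ [i], pvMarkB limit i st.2)
    else st
  if i + 2 < limit ∧ st1.2.getD (PySem.Int.floordiv (i + 2 - 2) 2).toNat false then
    (st1.1 ++ [i + 2], pvMarkB limit (i + 2) st1.2)
  else st1

def sieveB (limit : Int) : List Int :=
  ((PySem.List.pyRange 5 limit 6).foldl (pvSieveStepB limit)
    ([2, 3], Array.replicate (limit - 1).toNat true)).1

-- prefix[k] = sum of the first k primes, built by one accumulating fold; the Python list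
-- grows by append, so the port conses onto a reversed list and reverses once at the end (exact)
def pvPrefix (L : List Int) : List Int :=
  (L.foldl (fun (st : List Int × Int) p => ((st.2 + p) :: st.1, st.2 + p)) ([0], 0)).1.reverse

-- the hand-written binary search _maxLE of Source B: largest idx in [lo, hi] with xs[idx] <= target
-- (fuel ≥ hi - lo, so the 0-fuel branch is never reached at the calls below)
def pvMaxLE (xs : Array Int) (target : Int) : Nat → Nat → Nat → Nat
  | 0, lo, _ => lo
  | fuel + 1, lo, hi =>
    if lo < hi then
      let mid := (lo + hi + 1) / 2
      if xs.getD mid 0 ≤ target then pvMaxLE xs target fuel mid hi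
      else pvMaxLE xs target fuel lo (mid - 1)
    else lo

-- the 'for i in range(n+1)' loop of B, with its break when the window reaches the last prime;
-- prime_list and prefix are indexed as arrays (Python lists), via Larr and Parr
def pvOuterB (L : List Int) (Larr Parr : Array Int) (limit : Int) :
    Nat → Int → Int → Nat → Int
  | 0, ls, _, _ => ls
  | fuel + 1, ls, ll, i =>
    if i ≤ L.length then
      let j := pvMaxLE Parr (Parr.getD i 0 + limit) Parr.size 0 (Parr.size - 1)
      let ws := Parr.getD j 0 - Parr.getD i 0
      let k := pvMaxLE Larr ws Larr.size 0 (Larr.size - 1)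
      let lsll := if (j : Int) - (i : Int) > ll ∧ Larr.getD k 0 = ws then
          (ws, (j : Int) - (i : Int)) else (ls, ll)
      if j = L.length then lsll.1 else pvOuterB L Larr Parr limit fuel lsll.1 lsll.2 (i + 1)
    else ls

def largestConsPrimeSequence_alt (limit : Int) : Int :=
  let L := sieveB limit
  let P := pvPrefix L
  pvOuterB L L.toArray P.toArray limit (L.length + 2) 0 0 0

-- ===== PRECONDITION & SPEC =====
-- Pre_ excludes exactly limit < 3, where A raises IndexError (prime_list[i] past the end).
def Pre_largestConsPrimeSequence (limit : Int) : Prop := 3 ≤ limit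
instance (limit : Int) : Decidable (Pre_largestConsPrimeSequence limit) := by
  unfold Pre_largestConsPrimeSequence; infer_instance

def pvWitness_largestConsPrimeSequence : Int := 10

def Spec_largestConsPrimeSequence (limit : Int) (out : Int) : Prop := out = largestConsPrimeSequence_alt limit
instance (limit : Int) (out : Int) : Decidable (Spec_largestConsPrimeSequence limit out) := by unfold Spec_largestConsPrimeSequence; infer_instance

-- ===== CLAIM (what is proved, stated in full; the proofs are below) =====
def Claim_equal_largestConsPrimeSequence : Prop := ∀ (limit : Int), Dom_largestConsPrimeSequence limit → Pre_largestConsPrimeSequence limit → Spec_largestConsPrimeSequence limit (largestConsPrimeSequence limit)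


-- ===== LEMMAS AND PROOFS =====

-- prefix-sum function: sum of the first k elements
def pvPf (L : List Int) (k : Nat) : Int := (L.take k).sum

-- the maximal window end for start i: largest j ≤ len with P j ≤ P i + limit
def pvM (L : List Int) (limit : Int) (i : Nat) : Nat :=
  Nat.findGreatest (fun j => pvPf L j ≤ pvPf L i + limit) L.length

theorem pv_pf_zero (L : List Int) : pvPf L 0 = 0 := rfl

theorem pv_pf_succ (L : List Int) (k : Nat) (hk : k < L.length) :
    pvPf L (k + 1) = pvPf L k + L[k] := List.sum_take_succ L k hk

theorem pv_pf_mono (L : List Int) (hpos : ∀ x ∈ L, 1 ≤ x) :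
    ∀ {j k : Nat}, j ≤ k → k ≤ L.length → pvPf L j ≤ pvPf L k := by
  intro j k hjk hk
  induction k with
  | zero => interval_cases j; exact le_rfl
  | succ k ih =>
    rcases Nat.lt_or_ge j (k + 1) with h | h
    · have hk' : k < L.length := by omega
      have h1 : pvPf L j ≤ pvPf L k := ih (by omega) (by omega)
      have h2 : 1 ≤ L[k] := hpos _ (List.getElem_mem hk')
      have := pv_pf_succ L k hk'
      omega
    · have : j = k + 1 := by omega
      simp [this]

theorem pv_pf_nonneg (L : List Int) (hpos : ∀ x ∈ L, 1 ≤ x) {k : Nat} (hk : k ≤ L.length) :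
    0 ≤ pvPf L k := by
  have := pv_pf_mono L hpos (Nat.zero_le k) hk
  simpa [pv_pf_zero] using this

-- pvM basic facts
theorem pvM_le (L : List Int) (limit : Int) (i : Nat) : pvM L limit i ≤ L.length :=
  Nat.findGreatest_le _

theorem pvM_ge (L : List Int) (limit : Int) (i : Nat) {k : Nat} (hk : k ≤ L.length)
    (h : pvPf L k ≤ pvPf L i + limit) : k ≤ pvM L limit i :=
  Nat.le_findGreatest hk h

theorem pvM_spec (L : List Int) (limit : Int) (i : Nat) (hpos : ∀ x ∈ L, 1 ≤ x)
    (hlim : 0 ≤ limit) (hi : i ≤ L.length) :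
    pvPf L (pvM L limit i) ≤ pvPf L i + limit := by
  have h0 : pvPf L 0 ≤ pvPf L i + limit := by
    have := pv_pf_nonneg L hpos hi
    simp [pv_pf_zero]; omega
  exact Nat.findGreatest_spec (P := fun j => pvPf L j ≤ pvPf L i + limit) (Nat.zero_le _) h0

theorem pvM_self (L : List Int) (limit : Int) (i : Nat) (hlim : 0 ≤ limit)
    (hi : i ≤ L.length) : i ≤ pvM L limit i :=
  pvM_ge L limit i hi (by omega)

theorem pvM_mono_succ (L : List Int) (limit : Int) (i : Nat) (hpos : ∀ x ∈ L, 1 ≤ x)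
    (hlim : 0 ≤ limit) (hi : i + 1 ≤ L.length) :
    pvM L limit i ≤ pvM L limit (i + 1) := by
  apply pvM_ge L limit (i + 1) (pvM_le L limit i)
  have h1 := pvM_spec L limit i hpos hlim (by omega)
  have h2 := pv_pf_mono L hpos (show i ≤ i + 1 by omega) hi
  omega

-- the prefix map over an extended list, split at the old length
theorem pv_map_range_append (L : List Int) (x : Int) :
    (List.range ((L ++ [x]).length + 1)).map (pvPf (L ++ [x]))
      = (List.range (L.length + 1)).map (pvPf L) ++ [pvPf L L.length + x] := by
  have h2 : (L ++ [x]).length + 1 = (L.length + 1) + 1 := by simp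
  rw [h2, List.range_succ, List.map_append]
  congr 1
  · apply List.map_congr_left
    intro k hk
    have hk' : k ≤ L.length := by
      have := List.mem_range.mp hk; omega
    simp [pvPf, List.take_append_of_le_length hk']
  · have h1 : pvPf (L ++ [x]) (L.length + 1) = pvPf L L.length + x := by
      rw [pvPf, pvPf, List.take_of_length_le (by simp : (L ++ [x]).length ≤ L.length + 1),
        List.take_of_length_le (le_refl L.length)]
      simp
    simp [h1]

-- invariant of B's accumulating fold: reversed prefix list so far, and the running sum
theorem pv_prefix_fold (L : List Int) :
    L.foldl (fun (st : List Int × Int) p => ((st.2 + p) :: st.1, st.2 + p)) ([0], 0)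
      = (((List.range (L.length + 1)).map (pvPf L)).reverse, pvPf L L.length) := by
  induction L using List.reverseRecOn with
  | nil => rfl
  | append_singleton L x ih =>
    rw [List.foldl_append, ih, List.foldl_cons, List.foldl_nil]
    rw [pv_map_range_append, List.reverse_append]
    have h1 : pvPf (L ++ [x]) (L.length + 1) = pvPf L L.length + x := by
      rw [pvPf, pvPf, List.take_of_length_le (by simp : (L ++ [x]).length ≤ L.length + 1),
        List.take_of_length_le (le_refl L.length)]
      simp
    simp [h1]

-- pvPrefix is the list of prefix sums
theorem pv_prefix_eq (L : List Int) :
    pvPrefix L = (List.range (L.length + 1)).map (pvPf L) := by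
  rw [pvPrefix, pv_prefix_fold]
  simp

theorem pv_prefix_get (L : List Int) {k : Nat} (hk : k ≤ L.length) :
    PySem.List.pyGetD (pvPrefix L) (k : Int) 0 = pvPf L k := by
  rw [PySem.List.pyGetD_natCast, pv_prefix_eq]
  exact PySem.List.getD_map_range _ _ _ _ (by omega)

theorem pv_prefix_len (L : List Int) : (pvPrefix L).length = L.length + 1 := by
  rw [pv_prefix_eq]; simp

-- Array/List bridges for nonnegative indices (Python list get/set with in-range indices)
theorem pv_arr_getD {α : Type} [Inhabited α] (l : List α) (k : Nat) (d : α) :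
    l.toArray.getD k d = l.getD k d := by
  rw [Array.getD_eq_getD_getElem?, List.getElem?_toArray, List.getD_eq_getElem?_getD]

theorem pv_getD_bridge {α : Type} [Inhabited α] (l : List α) (k : Int) (d : α) (hk : 0 ≤ k) :
    l.toArray.getD k.toNat d = PySem.List.pyGetD l k d := by
  rw [pv_arr_getD]
  by_cases h : k.toNat < l.length
  · rw [PySem.List.pyGetD_eq_getElem l d hk (by omega), List.getD_eq_getElem l d h]
  · rw [PySem.List.pyGetD_of_none l k d]
    · rw [List.getD_eq_getElem?_getD, List.getElem?_eq_none (by omega)]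
      rfl
    · rw [PySem.List.pyGet?_eq_none_iff]
      intro hcon
      unfold PySem.Raise.InRange at hcon
      omega

theorem pv_setD_bridge {α : Type} (l : List α) (k : Int) (v : α) (hk : 0 ≤ k) :
    (PySem.List.pySetD l k v).toArray = l.toArray.setIfInBounds k.toNat v := by
  rw [PySem.List.pySetD_of_nonneg l v hk]
  exact (List.setIfInBounds_toArray l k.toNat v).symm

-- the two marking loops agree (indices (j-2)//2 are nonnegative for every j in the range)
theorem pv_markB_eq (limit i : Int) (h5 : 5 ≤ i) (ip : List Bool) :
    pvMarkB limit i ip.toArray = (pvMark limit i ip).toArray := by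
  unfold pvMarkB pvMark
  have hmem : ∀ j ∈ PySem.List.pyRange (i * i) limit (2 * i), 2 ≤ j := by
    intro j hj
    rw [PySem.List.mem_pyRange_iff_of_pos (by omega)] at hj
    have h25 : 25 ≤ i * i := by nlinarith
    omega
  generalize hrs : PySem.List.pyRange (i * i) limit (2 * i) = rs at *
  clear hrs
  induction rs generalizing ip with
  | nil => rfl
  | cons a rs ih =>
    have ha := hmem a List.mem_cons_self
    rw [List.foldl_cons, List.foldl_cons]
    have hidx : 0 ≤ PySem.Int.floordiv (a - 2) 2 := by
      rw [PySem.Int.floordiv_eq_ediv_of_pos (by omega)]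
      omega
    have hbr : ip.toArray.setIfInBounds (PySem.Int.floordiv (a - 2) 2).toNat false
        = (PySem.List.pySetD ip (PySem.Int.floordiv (a - 2) 2) false).toArray :=
      (pv_setD_bridge ip _ false hidx).symm
    rw [hbr]
    exact ih _ (fun j hj => hmem j (List.mem_cons_of_mem a hj))

-- one sieve step agrees between the two representations
theorem pv_stepB_eq (limit i : Int) (h5 : 5 ≤ i) (pr : List Int) (ip : List Bool) :
    pvSieveStepB limit (pr, ip.toArray) i
      = ((pvSieveStep limit (pr, ip) i).1, (pvSieveStep limit (pr, ip) i).2.toArray) := by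
  unfold pvSieveStepB pvSieveStep
  dsimp only
  have hg1 : ip.toArray.getD (PySem.Int.floordiv (i - 2) 2).toNat false
      = PySem.List.pyGetD ip (PySem.Int.floordiv (i - 2) 2) false := by
    apply pv_getD_bridge
    rw [PySem.Int.floordiv_eq_ediv_of_pos (by omega)]
    omega
  rw [hg1]
  by_cases h1 : PySem.List.pyGetD ip (PySem.Int.floordiv (i - 2) 2) false = true
  · rw [if_pos h1, if_pos h1]
    dsimp only
    rw [pv_markB_eq limit i h5 ip]
    have hg2 : (pvMark limit i ip).toArray.getD (PySem.Int.floordiv (i + 2 - 2) 2).toNat false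
        = PySem.List.pyGetD (pvMark limit i ip) (PySem.Int.floordiv (i + 2 - 2) 2) false := by
      apply pv_getD_bridge
      rw [PySem.Int.floordiv_eq_ediv_of_pos (by omega)]
      omega
    rw [hg2]
    by_cases h2 : i + 2 < limit ∧
        PySem.List.pyGetD (pvMark limit i ip) (PySem.Int.floordiv (i + 2 - 2) 2) false = true
    · rw [if_pos h2, if_pos h2]
      try dsimp only
      rw [pv_markB_eq limit (i + 2) (by omega)]
    · rw [if_neg h2, if_neg h2]
  · rw [if_neg h1, if_neg h1]
    try dsimp only
    have hg2 : ip.toArray.getD (PySem.Int.floordiv (i + 2 - 2) 2).toNat false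
        = PySem.List.pyGetD ip (PySem.Int.floordiv (i + 2 - 2) 2) false := by
      apply pv_getD_bridge
      rw [PySem.Int.floordiv_eq_ediv_of_pos (by omega)]
      omega
    rw [hg2]
    by_cases h2 : i + 2 < limit ∧
        PySem.List.pyGetD ip (PySem.Int.floordiv (i + 2 - 2) 2) false = true
    · rw [if_pos h2, if_pos h2]
      try dsimp only
      rw [pv_markB_eq limit (i + 2) (by omega)]
    · rw [if_neg h2, if_neg h2]

-- B's array sieve returns exactly A's prime list
theorem pv_sieveB_eq (limit : Int) : sieveB limit = sieve limit := by
  unfold sieveB sieve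
  have hmem : ∀ x ∈ PySem.List.pyRange 5 limit 6, 5 ≤ x := by
    intro x hx
    rw [PySem.List.mem_pyRange_iff_of_pos (by norm_num)] at hx
    omega
  rw [← List.toArray_replicate]
  generalize hrs : PySem.List.pyRange 5 limit 6 = rs at *
  clear hrs
  suffices h : ∀ (rs : List Int), (∀ x ∈ rs, 5 ≤ x) → ∀ (pr : List Int) (ip : List Bool),
      rs.foldl (pvSieveStepB limit) (pr, ip.toArray)
        = ((rs.foldl (pvSieveStep limit) (pr, ip)).1,
           (rs.foldl (pvSieveStep limit) (pr, ip)).2.toArray) by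
    rw [h rs hmem]
  clear hmem
  intro rs
  induction rs with
  | nil => intro _ pr ip; rfl
  | cons a rs ih =>
    intro hm pr ip
    rw [List.foldl_cons, List.foldl_cons, pv_stepB_eq limit a (hm a List.mem_cons_self)]
    exact ih (fun x hx => hm x (List.mem_cons_of_mem a hx)) _ _

-- the outer sieve range increases in steps of 6
theorem pv_range6_gap (limit : Int) :
    (PySem.List.pyRange 5 limit 6).Pairwise (fun a b => a + 6 ≤ b) := by
  rw [PySem.List.pyRange_of_pos 5 limit (by norm_num)]
  apply List.Pairwise.map
  · intro a b (h : a < b)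
    omega
  · exact List.pairwise_lt_range

-- the sieve's prime list is strictly increasing
theorem pv_sieve_sorted (limit : Int) : (sieve limit).Pairwise (· < ·) := by
  unfold sieve
  suffices h : ∀ (rs : List Int), rs.Pairwise (fun a b => a + 6 ≤ b) →
      ∀ (st : List Int × List Bool), st.1.Pairwise (· < ·) →
      (∀ x ∈ st.1, ∀ a ∈ rs, x + 2 ≤ a) →
      (rs.foldl (pvSieveStep limit) st).1.Pairwise (· < ·) by
    apply h _ (pv_range6_gap limit)
    · show ([2, 3] : List Int).Pairwise (· < ·)
      decide
    · intro x hx a ha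
      have h5 : 5 ≤ a := by
        rw [PySem.List.mem_pyRange_iff_of_pos (by norm_num)] at ha
        omega
      simp only [List.mem_cons, List.not_mem_nil, or_false] at hx
      rcases hx with hx | hx <;> omega
  intro rs
  induction rs with
  | nil => intro _ st hst _; exact hst
  | cons a rs ih =>
    intro hgap st hst hbnd
    rw [List.foldl_cons]
    have hgap' : rs.Pairwise (fun a b => a + 6 ≤ b) := hgap.of_cons
    have hga : ∀ b ∈ rs, a + 6 ≤ b := (List.pairwise_cons.mp hgap).1
    have ha := hbnd
    apply ih hgap'
    · -- the step's primes list stays strictly increasing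
      unfold pvSieveStep
      dsimp only
      have hax : ∀ x ∈ st.1, x < a := fun x hx => by
        have := hbnd x hx a List.mem_cons_self; omega
      split_ifs with h1 h2 h2 <;> (try dsimp only) <;>
        [skip; skip; skip; exact hst] <;>
        first
        | (rw [List.pairwise_append]
           refine ⟨?_, by simp, ?_⟩
           · rw [List.pairwise_append]
             exact ⟨hst, by simp, by intro x hx y hy; simp at hy; subst hy; exact hax x hx⟩
           · intro x hx y hy
             simp at hy; subst hy
             simp only [List.mem_append, List.mem_singleton] at hx
             rcases hx with hx | hx
             · have := hax x hx; omega
             · omega)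
        | (rw [List.pairwise_append]
           exact ⟨hst, by simp, by intro x hx y hy; simp at hy; subst hy; exact hax x hx⟩)
        | (rw [List.pairwise_append]
           refine ⟨hst, by simp, ?_⟩
           intro x hx y hy
           simp at hy; subst hy
           have := hax x hx; omega)
    · -- the bound against the remaining range elements is preserved
      intro x hx b hb
      have hab : a + 6 ≤ b := hga b hb
      unfold pvSieveStep at hx
      dsimp only at hx
      have hto : x ∈ st.1 → x + 2 ≤ b := fun hmem => by
        have := hbnd x hmem a List.mem_cons_self; omega
      split_ifs at hx with h1 h2 h2 <;>
        (try simp only [List.mem_append, List.mem_singleton] at hx) <;>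
        first
        | (rcases hx with (hx | hx) | hx
           · exact hto hx
           · omega
           · omega)
        | (rcases hx with hx | hx
           · exact hto hx
           · omega)
        | exact hto hx

-- _maxLE's characterisation: within [lo, hi] it lands on the greatest index whose value is ≤ t
theorem pv_maxle_char (xs : Array Int) (g : Nat → Int) (N : Nat)
    (hget : ∀ k, k ≤ N → xs.getD k 0 = g k)
    (hmono : ∀ j k, j ≤ k → k ≤ N → g j ≤ g k) (t : Int) :
    ∀ (fuel lo hi : Nat), hi - lo ≤ fuel → lo ≤ hi → hi ≤ N →
      (∀ k, hi < k → k ≤ N → t < g k) →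
      lo ≤ pvMaxLE xs t fuel lo hi ∧ pvMaxLE xs t fuel lo hi ≤ hi ∧
      (g (pvMaxLE xs t fuel lo hi) ≤ t ∨ pvMaxLE xs t fuel lo hi = lo) ∧
      (∀ k, k ≤ N → g k ≤ t → k ≤ pvMaxLE xs t fuel lo hi ∨ k < lo) := by
  intro fuel
  induction fuel with
  | zero =>
    intro lo hi hfuel hlh hhi hafter
    have he : hi = lo := by omega
    simp only [pvMaxLE]
    refine ⟨le_rfl, by omega, Or.inr (by simp), ?_⟩
    intro k hk hkt
    by_cases hklo : k ≤ lo
    · exact Or.inl hklo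
    · exact absurd hkt (not_le.mpr (hafter k (by omega) hk))
  | succ fuel ih =>
    intro lo hi hfuel hlh hhi hafter
    rw [pvMaxLE]
    by_cases hlt : lo < hi
    · simp only [if_pos hlt]
      have hmid1 : lo < (lo + hi + 1) / 2 := by omega
      have hmid2 : (lo + hi + 1) / 2 ≤ hi := by omega
      rw [hget _ (by omega)]
      by_cases hc : g ((lo + hi + 1) / 2) ≤ t
      · rw [if_pos hc]
        obtain ⟨p1, p2, p3, p4⟩ := ih ((lo + hi + 1) / 2) hi (by omega) (by omega) hhi hafter
        refine ⟨by omega, p2, Or.inl ?_, ?_⟩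
        · rcases p3 with p3 | p3
          · exact p3
          · rw [p3]; exact hc
        · intro k hk hkt
          rcases p4 k hk hkt with h | h
          · exact Or.inl h
          · exact Or.inl (by omega)
      · rw [if_neg hc]
        have hafter' : ∀ k, (lo + hi + 1) / 2 - 1 < k → k ≤ N → t < g k := by
          intro k hk hkn
          have h1 : g ((lo + hi + 1) / 2) ≤ g k := hmono _ _ (by omega) hkn
          omega
        obtain ⟨p1, p2, p3, p4⟩ := ih lo ((lo + hi + 1) / 2 - 1) (by omega) (by omega)
          (by omega) hafter'
        exact ⟨p1, by omega, p3, p4⟩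
    · simp only [if_neg hlt]
      have he : hi = lo := by omega
      refine ⟨le_rfl, by omega, Or.inr (by simp), ?_⟩
      intro k hk hkt
      by_cases hklo : k ≤ lo
      · exact Or.inl hklo
      · exact absurd hkt (not_le.mpr (hafter k (by omega) hk))

-- the prefix array and its entries
theorem pv_parr_get (L : List Int) {k : Nat} (hk : k ≤ L.length) :
    (pvPrefix L).toArray.getD k 0 = pvPf L k := by
  rw [pv_arr_getD, ← PySem.List.pyGetD_natCast, pv_prefix_get L hk]

theorem pv_parr_size (L : List Int) : (pvPrefix L).toArray.size = L.length + 1 := by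
  rw [List.size_toArray, pv_prefix_len]

-- B's prefix search computes exactly the maximal window end pvM
theorem pv_maxle_eq_m (L : List Int) (limit : Int) (i : Nat)
    (hpos : ∀ x ∈ L, 1 ≤ x) (hlim : 0 ≤ limit) (hi : i ≤ L.length) :
    pvMaxLE (pvPrefix L).toArray ((pvPrefix L).toArray.getD i 0 + limit)
      (pvPrefix L).toArray.size 0 ((pvPrefix L).toArray.size - 1) = pvM L limit i := by
  rw [pv_parr_get L hi, pv_parr_size]
  have h0 : pvPf L 0 ≤ pvPf L i + limit := by
    have := pv_pf_nonneg L hpos hi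
    rw [pv_pf_zero]; omega
  obtain ⟨p1, p2, p3, p4⟩ := pv_maxle_char (pvPrefix L).toArray (pvPf L) L.length
    (fun k hk => pv_parr_get L hk) (fun j k hjk hk => pv_pf_mono L hpos hjk hk)
    (pvPf L i + limit) (L.length + 1) 0 (L.length + 1 - 1)
    (by omega) (by omega) (by omega) (by intro k hk hkn; omega)
  rw [show L.length + 1 - 1 = L.length by omega] at p1 p2 p3 p4 ⊢
  have hval : pvPf L (pvMaxLE (pvPrefix L).toArray (pvPf L i + limit)
      (L.length + 1) 0 L.length) ≤ pvPf L i + limit := by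
    rcases p3 with p3 | p3
    · exact p3
    · rw [p3, pv_pf_zero]
      have hnn := pv_pf_nonneg L hpos hi
      omega
  apply Nat.le_antisymm
  · exact pvM_ge L limit i p2 hval
  · rcases p4 _ (pvM_le L limit i) (pvM_spec L limit i hpos hlim hi) with h | h
    · exact h
    · omega

-- B's membership search: the probed entry equals ws exactly when ws is a listed prime
theorem pv_maxle_mem (L : List Int) (hsort : L.Pairwise (· < ·)) (hn : 0 < L.length)
    (ws : Int) :
    (L.toArray.getD (pvMaxLE L.toArray ws L.toArray.size 0 (L.toArray.size - 1)) 0 = ws)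
      ↔ ws ∈ L := by
  have hmono : ∀ j k, j ≤ k → k ≤ L.length - 1 → L.getD j 0 ≤ L.getD k 0 := by
    intro j k hjk hk
    rcases Nat.eq_or_lt_of_le hjk with he | hlt
    · rw [he]
    · have := List.pairwise_iff_getElem.mp hsort j k (by omega) (by omega) hlt
      rw [List.getD_eq_getElem L 0 (by omega), List.getD_eq_getElem L 0 (by omega)]
      omega
  rw [show L.toArray.size = L.length from List.size_toArray]
  obtain ⟨p1, p2, p3, p4⟩ := pv_maxle_char L.toArray (fun k => L.getD k 0) (L.length - 1)
    (fun k _ => pv_arr_getD L k 0) hmono ws L.length 0 (L.length - 1)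
    (by omega) (by omega) (by omega) (by intro k hk hkn; omega)
  set r := pvMaxLE L.toArray ws L.length 0 (L.length - 1) with hr
  rw [pv_arr_getD]
  constructor
  · intro h
    rw [List.getD_eq_getElem L 0 (by omega)] at h
    exact h ▸ List.getElem_mem (by omega)
  · intro h
    obtain ⟨p, hp, hpe⟩ := List.mem_iff_getElem.mp h
    have hgp : L.getD p 0 = ws := by rw [List.getD_eq_getElem L 0 hp, hpe]
    rcases p4 p (by omega) (by omega) with hpr | hpr
    · rcases Nat.eq_or_lt_of_le hpr with he | hlt
      · rw [← he, hgp]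
      · -- p < r would force g p < g r ≤ ws = g p
        exfalso
        have hs := List.pairwise_iff_getElem.mp hsort p r (by omega) (by omega) hlt
        rcases p3 with p3 | p3
        · rw [List.getD_eq_getElem L 0 (by omega)] at p3
          omega
        · omega
    · omega

-- A's inner while loop lands exactly on the maximal window end
theorem pv_inner_eq (L : List Int) (limit : Int) (i : Nat) (hpos : ∀ x ∈ L, 1 ≤ x)
    (hlim : 0 ≤ limit) (hi : i ≤ L.length) :
    ∀ (fuel j : Nat), L.length + 1 - j ≤ fuel → j ≤ pvM L limit i →
      pvInnerA L limit fuel (pvPf L j - pvPf L i) j =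
        (pvPf L (pvM L limit i) - pvPf L i, pvM L limit i) := by
  intro fuel
  induction fuel with
  | zero =>
    intro j hfuel hj
    have := pvM_le L limit i
    omega
  | succ fuel ih =>
    intro j hfuel hj
    have hmn := pvM_le L limit i
    rw [pvInnerA]
    by_cases hjn : j < L.length
    · have hget : L.getD j 0 = L[j] := List.getD_eq_getElem L 0 hjn
      have hstep := pv_pf_succ L j hjn
      by_cases hc : pvPf L j - pvPf L i + L.getD j 0 ≤ limit
      · rw [if_pos ⟨hjn, hc⟩]
        have hj1 : j + 1 ≤ pvM L limit i := by
          apply pvM_ge L limit i (by omega)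
          rw [hget] at hc; omega
        have harg : pvPf L j - pvPf L i + L.getD j 0 = pvPf L (j + 1) - pvPf L i := by
          rw [hget]; omega
        rw [harg]
        exact ih (j + 1) (by omega) hj1
      · rw [if_neg (by intro h; exact hc h.2)]
        have hjm : j = pvM L limit i := by
          by_contra hne
          have hj1 : j + 1 ≤ pvM L limit i := by omega
          have h1 : pvPf L (j + 1) ≤ pvPf L (pvM L limit i) :=
            pv_pf_mono L hpos hj1 hmn
          have h2 := pvM_spec L limit i hpos hlim hi
          rw [hget] at hc
          omega
        rw [hjm]
    · rw [if_neg (by intro h; exact hjn h.1)]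
      have : j = L.length := by omega
      have hjm : j = pvM L limit i := by omega
      rw [hjm]

-- once the window has absorbed the last prime, A's outer loop stops with its accumulator
theorem pv_outerA_end (L : List Int) (s : PySem.Set Int) (limit : Int) :
    ∀ (fuel : Nat) (ls ll cs : Int) (i : Nat),
      pvOuterA L s limit fuel ls ll cs i L.length = ls := by
  intro fuel ls ll cs i
  cases fuel with
  | zero => rfl
  | succ fuel => simp [pvOuterA]

-- membership through A's set equals membership in the prime list
theorem pv_contains_iff (L : List Int) (ws : Int) :
    PySem.Set.contains (PySem.Set.ofList L) ws = true ↔ ws ∈ L := by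
  simp [PySem.Set.contains, PySem.Set.mem_ofList]

-- the simulation: A's outer loop ≡ B's indexed loop with its two binary searches
theorem pv_sim (L : List Int) (limit : Int)
    (hel : ∀ x ∈ L, 1 ≤ x ∧ x ≤ limit) (hlim : 0 ≤ limit)
    (hsort : L.Pairwise (· < ·)) :
    ∀ (fa fb : Nat) (ls ll : Int) (i j : Nat),
      i ≤ L.length → L.length + 1 - i ≤ fa → L.length + 1 - i ≤ fb → 0 ≤ ll →
      (i = 0 → j = 0) → (i ≠ 0 → j = pvM L limit (i - 1) ∧ pvM L limit (i - 1) < L.length) →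
      pvOuterA L (PySem.Set.ofList L) limit fa ls ll (pvPf L j - pvPf L i) i j =
        pvOuterB L L.toArray (pvPrefix L).toArray limit fb ls ll i := by
  have hpos : ∀ x ∈ L, 1 ≤ x := fun x hx => (hel x hx).1
  intro fa
  induction fa with
  | zero => intro fb ls ll i j hi hfa; omega
  | succ fa ih =>
    intro fb ls ll i j hi hfa hfb hll hj0 hjs
    cases fb with
    | zero => omega
    | succ fb =>
    have hjm : j ≤ pvM L limit i := by
      by_cases hz : i = 0
      · subst hz; rw [hj0 rfl]; exact Nat.zero_le _
      · obtain ⟨hj, _⟩ := hjs hz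
        subst hj
        have he : i - 1 + 1 = i := by omega
        calc pvM L limit (i - 1) ≤ pvM L limit (i - 1 + 1) :=
              pvM_mono_succ L limit (i - 1) hpos hlim (by omega)
          _ = pvM L limit i := by rw [he]
    by_cases hguard : j < L.length
    · -- main case: both loops process start index i
      have hn0 : 0 < L.length := by omega
      rw [pvOuterA, if_pos hguard, pvOuterB, if_pos hi]
      dsimp only
      have hinner := pv_inner_eq L limit i hpos hlim hi (L.length + 1) j (by omega) hjm
      rw [hinner]
      dsimp only
      rw [pv_maxle_eq_m L limit i hpos hlim hi]
      have hmn := pvM_le L limit i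
      have him := pvM_self L limit i hlim hi
      rw [pv_parr_get L hmn, pv_parr_get L hi]
      -- the two update conditions are the same proposition
      have hcond : ((pvM L limit i : Int) - (i : Int) > ll ∧
            PySem.Set.contains (PySem.Set.ofList L) (pvPf L (pvM L limit i) - pvPf L i) = true)
          ↔ ((pvM L limit i : Int) - (i : Int) > ll ∧
            L.toArray.getD (pvMaxLE L.toArray (pvPf L (pvM L limit i) - pvPf L i)
              L.toArray.size 0 (L.toArray.size - 1)) 0 = pvPf L (pvM L limit i) - pvPf L i) := by
        rw [pv_contains_iff, pv_maxle_mem L hsort hn0]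
      rw [if_congr hcond rfl rfl]
      by_cases hend : pvM L limit i = L.length
      · rw [if_pos hend]
        rw [hend, pv_outerA_end]
      · rw [if_neg hend]
        have hilt : i < L.length := by omega
        have hgetL : PySem.List.pyGetD L (i : Int) 0 = L[i] := by
          rw [PySem.List.pyGetD_natCast]
          exact List.getD_eq_getElem L 0 hilt
        have harg : pvPf L (pvM L limit i) - pvPf L i - PySem.List.pyGetD L (i : Int) 0 =
            pvPf L (pvM L limit i) - pvPf L (i + 1) := by
          rw [hgetL]
          have := pv_pf_succ L i hilt
          omega
        rw [harg]
        have hci : (i : Int) ≤ (pvM L limit i : Int) := by exact_mod_cast him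
        have hsimp : pvM L limit (i + 1 - 1) = pvM L limit i := by norm_num
        split_ifs with hupd
        · refine ih fb _ _ (i + 1) (pvM L limit i) (by omega) (by omega) (by omega)
            ?_ (by omega) (fun _ => ⟨hsimp, hsimp ▸ (by omega)⟩)
          omega
        · refine ih fb _ _ (i + 1) (pvM L limit i) (by omega) (by omega) (by omega)
            ?_ (by omega) (fun _ => ⟨hsimp, hsimp ▸ (by omega)⟩)
          exact hll
    · -- A's guard fails: j = L.length, possible only with i = 0 and an empty prime list
      have hje : j = L.length := by omega
      by_cases hz : i = 0
      · have hj0' := hj0 hz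
        have hn0 : L.length = 0 := by omega
        have hLnil : L = [] := List.eq_nil_of_length_eq_zero hn0
        subst hz hLnil
        rw [pvOuterA, if_neg hguard, pvOuterB, if_pos hi]
        dsimp only
        have hP : pvPrefix ([] : List Int) = [0] := rfl
        rw [hP]
        have hj' : pvMaxLE ([0] : List Int).toArray (([0] : List Int).toArray.getD 0 0 + limit)
            ([0] : List Int).toArray.size 0 (([0] : List Int).toArray.size - 1) = 0 := rfl
        rw [hj']
        rw [if_pos (show (0 : Nat) = ([] : List Int).length from rfl)]
        rw [if_neg (by rintro ⟨h1, -⟩; simp only [Nat.cast_zero, sub_self] at h1; omega)]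
      · obtain ⟨-, hlt⟩ := hjs hz
        omega

-- every prime the sieve returns lies in [2, limit]  (for 3 ≤ limit)
theorem pv_sieve_fold (limit : Int) :
    ∀ (l : List Int), (∀ i ∈ l, 5 ≤ i ∧ i < limit) →
      ∀ (st : List Int × List Bool), (∀ x ∈ st.1, 2 ≤ x ∧ x ≤ limit) →
      ∀ x ∈ (l.foldl (pvSieveStep limit) st).1, 2 ≤ x ∧ x ≤ limit := by
  intro l
  induction l with
  | nil => intro _ st hst x hx; exact hst x hx
  | cons a l ih =>
    intro hl st hst
    rw [List.foldl_cons]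
    apply ih (fun i hi => hl i (List.mem_cons_of_mem a hi))
    intro x hx
    have ha := hl a List.mem_cons_self
    have hmem : x ∈ st.1 ∨ x = a ∨ (x = a + 2 ∧ a + 2 < limit) := by
      unfold pvSieveStep at hx
      dsimp only at hx
      split_ifs at hx with h1 h2 h2 <;>
        (try simp only [List.mem_append, List.mem_singleton] at hx) <;> tauto
    rcases hmem with h | h | ⟨h, hlt⟩
    · exact hst x h
    · subst h; exact ⟨by omega, by omega⟩
    · subst h; exact ⟨by omega, by omega⟩

theorem pv_sieve_mem' (limit : Int) (hlim : 3 ≤ limit) :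
    ∀ x ∈ sieve limit, 2 ≤ x ∧ x ≤ limit := by
  unfold sieve
  apply pv_sieve_fold limit
  · intro i hi
    rw [PySem.List.mem_pyRange_iff_of_pos (by norm_num)] at hi
    exact ⟨hi.1, hi.2.1⟩
  · intro x hx
    simp only [List.mem_cons, List.not_mem_nil, or_false] at hx
    rcases hx with hx | hx <;> subst hx <;> constructor <;> omega

-- ===== VERDICT (by name: the statement is the Claim_ definition above) =====
theorem largestConsPrimeSequence_spec : Claim_equal_largestConsPrimeSequence := by
  intro limit _ hpre
  unfold Pre_largestConsPrimeSequence at hpre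
  unfold Spec_largestConsPrimeSequence largestConsPrimeSequence largestConsPrimeSequence_alt
  dsimp only
  rw [pv_sieveB_eq]
  have hel : ∀ x ∈ sieve limit, 1 ≤ x ∧ x ≤ limit := fun x hx =>
    ⟨by have := (pv_sieve_mem' limit hpre x hx).1; omega, (pv_sieve_mem' limit hpre x hx).2⟩
  have hsim := pv_sim (sieve limit) limit hel (by omega) (pv_sieve_sorted limit)
    ((sieve limit).length + 2) ((sieve limit).length + 2) 0 0 0 0 (Nat.zero_le _)
    (by omega) (by omega) le_rfl (fun _ => rfl) (fun h => absurd rfl h)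
  simpa [pv_pf_zero] using hsim
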